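-- pv_equiv track=rewrite | github.com/daudef/advent-of-code | aoc/year23/day09/part1/solution.py | predict_next_value
-- ===== SOURCE A (Python) =====
-- import itertools
--
-- def predict_next_value(values: list[int], is_negative: bool = False) -> int:
--     if all(value == 0 for value in values):
--         return 0
--
--     next_diff = predict_next_value(
--         [v2 - v1 for v1, v2 in itertools.pairwise(values)], is_negative=is_negative
--     )
--
--     if is_negative:
--         return values[0] - next_diff
--
--     return values[-1] + next_diff
-- ===== SOURCE B (Python) =====
-- def predict_next_value(values: list[int], is_negative: bool = False) -> int:
--     # Newton forward-difference closed form: one pass with a running binomial coefficient.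
--     if is_negative:
--         values = values[::-1]
--     n = len(values)
--     total = 0
--     c = 1  # C(n, i)
--     for i, v in enumerate(values):
--         total += (-1) ** (n - 1 - i) * c * v
--         c = c * (n - i) // (i + 1)
--     return total
-- ===== Notes on version B (the rewrite author's own statement) =====
-- stated objective: faster
-- what changed: Replaces A's recursive tower of pairwise-difference lists with the Newton forward-difference closed form: a single pass over the (possibly reversed) list accumulating binomial-coefficient-weighted terms.
import Mathlib
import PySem

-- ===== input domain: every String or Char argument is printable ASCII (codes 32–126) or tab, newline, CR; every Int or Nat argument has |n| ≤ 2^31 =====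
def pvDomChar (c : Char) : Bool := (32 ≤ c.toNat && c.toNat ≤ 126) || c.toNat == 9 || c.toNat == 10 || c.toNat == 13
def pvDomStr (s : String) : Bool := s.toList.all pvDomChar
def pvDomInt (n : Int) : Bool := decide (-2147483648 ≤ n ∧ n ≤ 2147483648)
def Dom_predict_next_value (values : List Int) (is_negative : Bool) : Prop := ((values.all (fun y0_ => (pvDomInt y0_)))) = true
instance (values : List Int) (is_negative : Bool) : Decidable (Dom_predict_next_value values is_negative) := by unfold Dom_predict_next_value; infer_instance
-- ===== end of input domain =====

-- B replaces A's recursive O(n^2) difference tower by the Newton forward-difference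
-- closed form (one pass with a running binomial coefficient); objective: faster.

-- ===== PORT A =====

-- itertools.pairwise differences: [v2 - v1 for v1, v2 in pairwise(values)]
def pvDiffs : List Int → List Int
  | a :: b :: t => (b - a) :: pvDiffs (b :: t)
  | _ => []

theorem pvDiffs_length (v : List Int) : (pvDiffs v).length = v.length - 1 := by
  induction v with
  | nil => simp [pvDiffs]
  | cons a t ih =>
    cases t with
    | nil => simp [pvDiffs]
    | cons b u => simp [pvDiffs] at ih ⊢; omega

def predict_next_value (values : List Int) (is_negative : Bool) : Int :=
  if values.all (fun value => value == 0) then 0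
  else
    let next_diff := predict_next_value (pvDiffs values) is_negative
    if is_negative then
      -- values[0]: IndexError unreachable here (values ≠ [] in this branch)
      (PySem.List.pyGet? values 0).getD 0 - next_diff
    else
      -- values[-1]: IndexError unreachable here (values ≠ [] in this branch)
      (PySem.List.pyGet? values (-1)).getD 0 + next_diff
termination_by values.length
decreasing_by
  rename_i h
  have hne : values ≠ [] := by intro hn; subst hn; simp at h
  have h1 := pvDiffs_length values
  have h2 : 0 < values.length := List.length_pos_of_ne_nil hne
  omega

-- ===== PORT B =====

def predict_next_value_alt (values : List Int) (is_negative : Bool) : Int :=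
  let vs := if is_negative then values.reverse else values   -- values[::-1]
  let n : Nat := vs.length
  ((PySem.List.enumerate vs).foldl
    (fun (st : Int × Int) (p : Int × Int) =>
      (st.1 + (-1) ^ (((n : Int) - 1 - p.1).toNat) * st.2 * p.2,
       PySem.Int.floordiv (st.2 * ((n : Int) - p.1)) (p.1 + 1)))
    (0, 1)).1

-- ===== PRECONDITION & SPEC =====
def Spec_predict_next_value (values : List Int) (is_negative : Bool) (out : Int) : Prop := out = predict_next_value_alt values is_negative
instance (values : List Int) (is_negative : Bool) (out : Int) : Decidable (Spec_predict_next_value values is_negative out) := by unfold Spec_predict_next_value; infer_instance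

-- ===== CLAIM (what is proved, stated in full; the proofs are below) =====
def Claim_equal_predict_next_value : Prop := ∀ (values : List Int) (is_negative : Bool), Dom_predict_next_value values is_negative → Spec_predict_next_value values is_negative (predict_next_value values is_negative)

-- ===== LEMMAS AND PROOFS =====

-- Newton forward-difference value of a sequence
def pvNewt (v : List Int) : Int :=
  ∑ i ∈ Finset.range v.length,
    (-1 : Int) ^ (v.length - 1 - i) * (v.length.choose i : Int) * v.getD i 0

theorem pvNewt_zero (v : List Int) (h : ∀ x ∈ v, x = 0) : pvNewt v = 0 := by
  unfold pvNewt
  refine Finset.sum_eq_zero (fun i hi => ?_)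
  have hi' : i < v.length := Finset.mem_range.mp hi
  have : v.getD i 0 = 0 := by
    have := h (v.getD i 0) (by
      have : v.getD i 0 = v[i] := by simp [List.getD_eq_getElem?_getD, hi']
      rw [this]; exact List.getElem_mem hi')
    exact this
  rw [this]; ring

theorem pvDiffs_getD (v : List Int) (i : Nat) (h : i + 1 < v.length) :
    (pvDiffs v).getD i 0 = v.getD (i + 1) 0 - v.getD i 0 := by
  induction v generalizing i with
  | nil => simp at h
  | cons a t ih =>
    cases t with
    | nil => simp at h
    | cons b u =>
      cases i with
      | zero => simp [pvDiffs]
      | succ j =>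
        simp only [pvDiffs, List.getD_cons_succ]
        exact ih j (by simpa using Nat.lt_of_succ_lt_succ h)

-- the key Newton step as an abstract coefficient identity
theorem pvKey (k : Nat) (u : Nat → Int) :
    ∑ i ∈ Finset.range (k+2), (-1 : Int) ^ (k + 1 - i) * ((k+2).choose i : Int) * u i
    = u (k+1) + ∑ i ∈ Finset.range (k+1),
        (-1 : Int) ^ (k - i) * ((k+1).choose i : Int) * (u (i+1) - u i) := by
  have hsub : ∑ i ∈ Finset.range (k+1), (-1 : Int) ^ (k - i) * ((k+1).choose i : Int) * (u (i+1) - u i)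
      = (∑ i ∈ Finset.range (k+1), (-1 : Int) ^ (k - i) * ((k+1).choose i : Int) * u (i+1))
        - ∑ i ∈ Finset.range (k+1), (-1 : Int) ^ (k - i) * ((k+1).choose i : Int) * u i := by
    rw [← Finset.sum_sub_distrib]
    exact Finset.sum_congr rfl (fun i _ => by ring)
  rw [hsub]
  have hmain : (∑ i ∈ Finset.range (k+1), (-1 : Int) ^ (k + 1 - i) * ((k+2).choose i : Int) * u i)
      + ∑ i ∈ Finset.range (k+1), (-1 : Int) ^ (k - i) * ((k+1).choose i : Int) * u i
      = ∑ i ∈ Finset.range k, (-1 : Int) ^ (k - i) * ((k+1).choose i : Int) * u (i+1) := by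
    rw [← Finset.sum_add_distrib, Finset.sum_range_succ']
    have h0 : (-1 : Int) ^ (k + 1 - 0) * ((k+2).choose 0 : Int) * u 0
        + (-1 : Int) ^ (k - 0) * ((k+1).choose 0 : Int) * u 0 = 0 := by
      have e : k + 1 - 0 = (k - 0) + 1 := by omega
      rw [e, pow_succ]
      simp
    rw [h0, add_zero]
    refine Finset.sum_congr rfl (fun i hi => ?_)
    have hik : i < k := Finset.mem_range.mp hi
    have e1 : k + 1 - (i + 1) = k - (i + 1) + 1 := by omega
    have e2 : k - i = k - (i + 1) + 1 := by omega
    have hpas : ((k+2).choose (i+1) : Int) = ((k+1).choose i : Int) + ((k+1).choose (i+1) : Int) := by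
      exact_mod_cast Nat.choose_succ_succ (k+1) i
    rw [e1, e2, hpas, pow_succ]
    ring
  have htopA : (-1 : Int) ^ (k + 1 - (k+1)) * ((k+2).choose (k+1) : Int) * u (k+1)
      = ((k : Int) + 2) * u (k+1) := by
    have e : k + 1 - (k + 1) = 0 := by omega
    rw [e, pow_zero, Nat.choose_succ_self_right]
    push_cast
    ring
  have htopC : (-1 : Int) ^ (k - k) * ((k+1).choose k : Int) * u (k+1)
      = ((k : Int) + 1) * u (k+1) := by
    have e : k - k = 0 := by omega
    rw [e, pow_zero, Nat.choose_succ_self_right]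
    push_cast
    ring
  calc ∑ i ∈ Finset.range (k+2), (-1 : Int) ^ (k + 1 - i) * ((k+2).choose i : Int) * u i
      = (∑ i ∈ Finset.range (k+1), (-1 : Int) ^ (k + 1 - i) * ((k+2).choose i : Int) * u i)
        + (-1 : Int) ^ (k + 1 - (k+1)) * ((k+2).choose (k+1) : Int) * u (k+1) := Finset.sum_range_succ _ _
    _ = (∑ i ∈ Finset.range k, (-1 : Int) ^ (k - i) * ((k+1).choose i : Int) * u (i+1))
        - (∑ i ∈ Finset.range (k+1), (-1 : Int) ^ (k - i) * ((k+1).choose i : Int) * u i)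
        + ((k : Int) + 2) * u (k+1) := by rw [htopA]; linarith [hmain]
    _ = u (k+1) + ((∑ i ∈ Finset.range k, (-1 : Int) ^ (k - i) * ((k+1).choose i : Int) * u (i+1))
        + (-1 : Int) ^ (k - k) * ((k+1).choose k : Int) * u (k+1)
        - ∑ i ∈ Finset.range (k+1), (-1 : Int) ^ (k - i) * ((k+1).choose i : Int) * u i) := by
          rw [htopC]; ring
    _ = u (k+1) + ((∑ i ∈ Finset.range (k+1), (-1 : Int) ^ (k - i) * ((k+1).choose i : Int) * u (i+1))
        - ∑ i ∈ Finset.range (k+1), (-1 : Int) ^ (k - i) * ((k+1).choose i : Int) * u i) := by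
          rw [Finset.sum_range_succ (fun i => (-1 : Int) ^ (k - i) * ((k+1).choose i : Int) * u (i+1))]

theorem pvNewt_step (v : List Int) (hv : v ≠ []) :
    pvNewt v = v.getD (v.length - 1) 0 + pvNewt (pvDiffs v) := by
  obtain ⟨m, hm⟩ : ∃ m, v.length = m + 1 := by
    cases v with | nil => exact absurd rfl hv | cons a t => exact ⟨t.length, rfl⟩
  have hdl : (pvDiffs v).length = m := by rw [pvDiffs_length]; omega
  unfold pvNewt
  rw [hm, hdl]
  have hd : ∀ i ∈ Finset.range m,
      (-1 : Int) ^ (m - 1 - i) * (m.choose i : Int) * (pvDiffs v).getD i 0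
      = (-1 : Int) ^ (m - 1 - i) * (m.choose i : Int) * (v.getD (i+1) 0 - v.getD i 0) := by
    intro i hi
    have : i + 1 < v.length := by rw [hm]; exact Nat.succ_lt_succ (Finset.mem_range.mp hi)
    rw [pvDiffs_getD v i this]
  rw [Finset.sum_congr rfl hd]
  cases m with
  | zero => simp
  | succ k =>
    have e1 : ∀ i ∈ Finset.range (k+2),
        (-1 : Int) ^ (k + 1 + 1 - 1 - i) * ((k+1+1).choose i : Int) * v.getD i 0
        = (-1 : Int) ^ (k + 1 - i) * ((k+2).choose i : Int) * v.getD i 0 := by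
      intro i _
      have : k + 1 + 1 - 1 - i = k + 1 - i := by omega
      rw [this]
    have e2 : ∀ i ∈ Finset.range (k+1),
        (-1 : Int) ^ (k + 1 - 1 - i) * ((k+1).choose i : Int) * (v.getD (i+1) 0 - v.getD i 0)
        = (-1 : Int) ^ (k - i) * ((k+1).choose i : Int) * (v.getD (i+1) 0 - v.getD i 0) := by
      intro i _
      have : k + 1 - 1 - i = k - i := by omega
      rw [this]
    rw [Finset.sum_congr rfl e1, Finset.sum_congr rfl e2]
    have : k + 1 + 1 - 1 = k + 1 := by omega
    rw [this]
    exact pvKey k (fun i => v.getD i 0)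

-- the Bool all-test read as a Prop
theorem pv_all_zero_iff (v : List Int) :
    v.all (fun value => value == 0) = true ↔ ∀ x ∈ v, x = 0 := by
  simp [List.all_eq_true]

theorem pv_last_getD (v : List Int) (hv : v ≠ []) :
    (PySem.List.pyGet? v (-1)).getD 0 = v.getD (v.length - 1) 0 := by
  rw [PySem.List.pyGet?_neg_one]
  cases v with
  | nil => exact absurd rfl hv
  | cons a t =>
    have hlt : (a :: t).length - 1 < (a :: t).length := by simp
    rw [List.getLast?_eq_getElem?]
    simp [List.getD_eq_getElem?_getD]

-- A on is_negative = false computes the Newton value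
theorem pvA_false (v : List Int) : predict_next_value v false = pvNewt v := by
  induction hn : v.length using Nat.strong_induction_on generalizing v with
  | _ n ih =>
    rw [predict_next_value]
    by_cases h : v.all (fun value => value == 0) = true
    · rw [if_pos h, pvNewt_zero v ((pv_all_zero_iff v).mp h)]
    · rw [if_neg h]
      have hv : v ≠ [] := by intro hnil; subst hnil; simp at h
      have hlen : (pvDiffs v).length < n := by
        rw [pvDiffs_length, hn]; subst hn
        cases v with | nil => exact absurd rfl hv | cons a t => simp
      have hih := ih (pvDiffs v).length (by omega) (pvDiffs v) rfl
      rw [hih, pv_last_getD v hv, pvNewt_step v hv]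
      simp

-- negation flips the Newton value
theorem pvNewt_neg (v : List Int) :
    pvNewt (v.map (fun x => -x)) = - pvNewt v := by
  unfold pvNewt
  rw [← Finset.sum_neg_distrib, List.length_map]
  refine Finset.sum_congr rfl (fun i hi => ?_)
  have hi' : i < v.length := Finset.mem_range.mp hi
  have : (v.map (fun x => -x)).getD i 0 = - v.getD i 0 := by
    simp [List.getD_eq_getElem?_getD, hi']
  rw [this]; ring

theorem pvDiffs_snoc (w : List Int) (x y : Int) :
    pvDiffs ((w ++ [x]) ++ [y]) = pvDiffs (w ++ [x]) ++ [y - x] := by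
  induction w with
  | nil => simp [pvDiffs]
  | cons a t ih =>
    cases t with
    | nil => simp [pvDiffs]
    | cons b u =>
      simp only [List.cons_append, pvDiffs] at ih ⊢
      rw [ih]

theorem pvDiffs_reverse (v : List Int) :
    pvDiffs v.reverse = ((pvDiffs v).map (fun x => -x)).reverse := by
  induction v with
  | nil => simp [pvDiffs]
  | cons a t ih =>
    cases t with
    | nil => simp [pvDiffs]
    | cons b u =>
      have h1 : (a :: b :: u).reverse = (u.reverse ++ [b]) ++ [a] := by simp
      have h2 : (b :: u).reverse = u.reverse ++ [b] := by simp
      rw [h1, pvDiffs_snoc, ← h2, ih]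
      simp [pvDiffs, neg_sub]

-- A on is_negative = true is A on the reversed list
theorem pvA_true (v : List Int) :
    predict_next_value v true = predict_next_value v.reverse false := by
  induction hn : v.length using Nat.strong_induction_on generalizing v with
  | _ n ih =>
    rw [predict_next_value]
    conv_rhs => rw [predict_next_value]
    by_cases h : v.all (fun value => value == 0) = true
    · rw [if_pos h, if_pos (by simpa using h)]
    · have hv : v ≠ [] := by intro hnil; subst hnil; simp at h
      have hrev : ¬ (v.reverse.all (fun value => value == 0) = true) := by simpa using h
      rw [if_neg h, if_neg hrev]
      simp only [if_true, Bool.false_eq_true, if_false]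
      have hlast : (PySem.List.pyGet? v.reverse (-1)).getD 0 = (PySem.List.pyGet? v 0).getD 0 := by
        rw [PySem.List.pyGet?_neg_one, List.getLast?_reverse, PySem.List.pyGet?_zero,
          List.head?_eq_getElem?]
      have hlen : (pvDiffs v).length < n := by
        rw [pvDiffs_length, hn]; subst hn
        cases v with | nil => exact absurd rfl hv | cons a t => simp
      have hih := ih (pvDiffs v).length (by omega) (pvDiffs v) rfl
      rw [hih, pvDiffs_reverse, ← List.map_reverse, pvA_false,
        pvA_false (List.map (fun x => -x) (pvDiffs v).reverse), pvNewt_neg, hlast]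
      ring

-- fold invariant for B: running coefficient is the binomial coefficient
theorem pvB_fold (n : Nat) (w : List Int) : ∀ (k : Nat) (t : Int), k + w.length ≤ n →
    ((PySem.List.enumerate w (k : Int)).foldl
      (fun (st : Int × Int) (p : Int × Int) =>
        (st.1 + (-1) ^ (((n : Int) - 1 - p.1).toNat) * st.2 * p.2,
         PySem.Int.floordiv (st.2 * ((n : Int) - p.1)) (p.1 + 1)))
      (t, (n.choose k : Int))).1
    = t + ∑ i ∈ Finset.range w.length,
        (-1 : Int) ^ (n - 1 - (k + i)) * (n.choose (k + i) : Int) * w.getD i 0 := by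
  induction w with
  | nil => intro k t _; simp [PySem.List.enumerate]
  | cons x xs ih =>
    intro k t hlen
    have hk : k < n := by simp at hlen; omega
    rw [PySem.List.enumerate_cons, List.foldl_cons]
    have hexp : (((n : Int) - 1 - (k : Int)).toNat) = n - 1 - k := by omega
    have hc' : PySem.Int.floordiv ((n.choose k : Int) * ((n : Int) - (k : Int))) ((k : Int) + 1)
        = (n.choose (k+1) : Int) := by
      have hmul : (n.choose k : Int) * ((n : Int) - (k : Int)) = (n.choose (k+1) : Int) * ((k : Int) + 1) := by
        have h := Nat.choose_succ_right_eq n k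
        have h2 : ((n.choose (k+1) * (k+1) : Nat) : Int) = ((n.choose k * (n - k) : Nat) : Int) := by
          exact_mod_cast h
        push_cast [Nat.cast_sub (le_of_lt hk)] at h2
        linarith
      rw [hmul, PySem.Int.floordiv_eq_ediv_of_pos (by positivity), Int.mul_ediv_cancel _ (by omega : ((k : Int) + 1) ≠ 0)]
    rw [hc']
    have hcast : (k : Int) + 1 = ((k + 1 : Nat) : Int) := by push_cast; ring
    rw [hcast, ih (k+1) _ (by simp only [List.length_cons] at hlen; omega)]
    simp only [List.length_cons]
    rw [Finset.sum_range_succ' (fun i => (-1 : Int) ^ (n - 1 - (k + i)) * (n.choose (k + i) : Int) * (x :: xs).getD i 0) xs.length]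
    have hpt : ∀ i ∈ Finset.range xs.length,
        (-1 : Int) ^ (n - 1 - (k + (i + 1))) * (n.choose (k + (i + 1)) : Int) * (x :: xs).getD (i+1) 0
        = (-1 : Int) ^ (n - 1 - (k + 1 + i)) * (n.choose (k + 1 + i) : Int) * xs.getD i 0 := by
      intro i _
      have e : k + (i + 1) = k + 1 + i := by omega
      rw [e, List.getD_cons_succ]
    rw [Finset.sum_congr rfl hpt]
    simp only [Nat.add_zero, List.getD_cons_zero, hexp]
    ring

theorem pvB_eq_newt (v : List Int) (b : Bool) :
    predict_next_value_alt v b = pvNewt (if b then v.reverse else v) := by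
  have key : ∀ (vs : List Int),
      ((PySem.List.enumerate vs).foldl
        (fun (st : Int × Int) (p : Int × Int) =>
          (st.1 + (-1) ^ (((vs.length : Int) - 1 - p.1).toNat) * st.2 * p.2,
           PySem.Int.floordiv (st.2 * ((vs.length : Int) - p.1)) (p.1 + 1)))
        (0, 1)).1 = pvNewt vs := by
    intro vs
    have h0 : ((0 : Nat) : Int) = (0 : Int) := by norm_num
    have h1 : ((vs.length.choose 0 : Nat) : Int) = (1 : Int) := by simp
    have hfold := pvB_fold vs.length vs 0 0 (by omega)
    rw [h0, h1] at hfold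
    rw [hfold]
    unfold pvNewt
    simp

  cases b with
  | false =>
    show ((PySem.List.enumerate v).foldl _ (0, 1)).1 = pvNewt v
    exact key v
  | true =>
    show ((PySem.List.enumerate v.reverse).foldl _ (0, 1)).1 = pvNewt v.reverse
    exact key v.reverse

-- ===== VERDICT (by name: the statement is the Claim_ definition above) =====
theorem predict_next_value_spec : Claim_equal_predict_next_value := by
  intro values is_negative _
  unfold Spec_predict_next_value
  rw [pvB_eq_newt]
  cases is_negative with
  | false => simpa using pvA_false values
  | true =>
    rw [pvA_true, pvA_false]
    simp
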